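-- pv_equiv track=rewrite | github.com/Pedro-csta/SEO-AI | app.py | analyze_site_strategy
-- ===== SOURCE A (Python) =====
-- def analyze_site_strategy(site_structure):
--     """Analisa a estratégia de estrutura do site"""
--     if not site_structure.get('structure'):
--         return "Não foi possível analisar a estrutura do site."
--
--     pages = site_structure['structure']
--     depth_analysis = {}
--
--     for page in pages:
--         depth = page['depth']
--         if depth not in depth_analysis:
--             depth_analysis[depth] = []
--         depth_analysis[depth].append(page)
--
--     insights = []
--
--     # Análise de profundidade
--     max_depth = max(depth_analysis.keys()) if depth_analysis else 0
--     if max_depth <= 2: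
--         insights.append("✅ **Estrutura rasa**: Boa para SEO, fácil navegação")
--     elif max_depth <= 4:
--         insights.append("⚠️ **Estrutura média**: Adequada, mas pode ser otimizada")
--     else:
--         insights.append("❌ **Estrutura muito profunda**: Pode dificultar indexação")
--
--     # Análise de distribuição
--     pages_per_level = [len(depth_analysis.get(i, [])) for i in range(max_depth + 1)]
--     if len(pages_per_level) > 1 and pages_per_level[1] > pages_per_level[0] * 3:
--         insights.append("⚠️ **Muitas páginas no segundo nível**: Considere subcategorias")
--
--     # Análise de navegação
--     home_links = len(depth_analysis.get(0, []))
--     if home_links > 10: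
--         insights.append("⚠️ **Muitos links na home**: Pode diluir autoridade")
--     elif home_links < 3:
--         insights.append("❌ **Poucos links na home**: Pode prejudicar descoberta de conteúdo")
--
--     return "\n".join(insights)
-- ===== SOURCE B (Python) =====
-- def analyze_site_strategy(site_structure):
--     """Analisa a estratégia de estrutura do site (one pass, three scalars)"""
--     pages = site_structure.get('structure')
--     if not pages:
--         return "Não foi possível analisar a estrutura do site."
--
--     max_depth = None
--     count0 = 0
--     count1 = 0
--     for page in pages:
--         d = page['depth']
--         if max_depth is None or d > max_depth:
--             max_depth = d
--         if d == 0: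
--             count0 += 1
--         elif d == 1:
--             count1 += 1
--
--     insights = []
--     if max_depth <= 2:
--         insights.append("✅ **Estrutura rasa**: Boa para SEO, fácil navegação")
--     elif max_depth <= 4:
--         insights.append("⚠️ **Estrutura média**: Adequada, mas pode ser otimizada")
--     else:
--         insights.append("❌ **Estrutura muito profunda**: Pode dificultar indexação")
--
--     if max_depth >= 1 and count1 > count0 * 3:
--         insights.append("⚠️ **Muitas páginas no segundo nível**: Considere subcategorias")
--
--     if count0 > 10:
--         insights.append("⚠️ **Muitos links na home**: Pode diluir autoridade")
--     elif count0 < 3: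
--         insights.append("❌ **Poucos links na home**: Pode prejudicar descoberta de conteúdo")
--
--     return "\n".join(insights)
-- ===== Notes on version B (the rewrite author's own statement) =====
-- stated objective: simpler
-- what changed: Replaces A's dict grouping pages by depth plus a per-level pages_per_level list with one linear pass that keeps only three scalars (running max depth, count of depth-0 pages, count of depth-1 pages) and derives the same insight strings from them.
import Mathlib
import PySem

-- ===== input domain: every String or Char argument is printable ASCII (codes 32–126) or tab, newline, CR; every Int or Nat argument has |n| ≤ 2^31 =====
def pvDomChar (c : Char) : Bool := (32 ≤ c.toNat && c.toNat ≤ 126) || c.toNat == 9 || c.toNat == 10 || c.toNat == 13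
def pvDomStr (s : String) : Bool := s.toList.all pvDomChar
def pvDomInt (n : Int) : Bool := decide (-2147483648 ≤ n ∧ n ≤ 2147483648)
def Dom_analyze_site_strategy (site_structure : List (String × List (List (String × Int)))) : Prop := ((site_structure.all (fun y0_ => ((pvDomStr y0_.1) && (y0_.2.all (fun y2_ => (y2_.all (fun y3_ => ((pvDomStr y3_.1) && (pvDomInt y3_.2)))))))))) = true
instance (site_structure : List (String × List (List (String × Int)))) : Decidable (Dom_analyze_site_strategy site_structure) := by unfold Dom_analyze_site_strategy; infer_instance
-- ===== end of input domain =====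

-- B simplifies A: one linear pass keeping three scalars (running max depth, #pages at depth 0, #pages at depth 1)
-- instead of A's dict grouping pages by depth plus a per-level list; same returned string (return value only).

-- message constants (shared verbatim by both ports)
def pvMsgNoStruct : String := "Não foi possível analisar a estrutura do site."
def pvMsgShallow : String := "✅ **Estrutura rasa**: Boa para SEO, fácil navegação"
def pvMsgMid : String := "⚠️ **Estrutura média**: Adequada, mas pode ser otimizada"
def pvMsgDeep : String := "❌ **Estrutura muito profunda**: Pode dificultar indexação"
def pvMsgSecond : String := "⚠️ **Muitas páginas no segundo nível**: Considere subcategorias"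
def pvMsgMany : String := "⚠️ **Muitos links na home**: Pode diluir autoridade"
def pvMsgFew : String := "❌ **Poucos links na home**: Pode prejudicar descoberta de conteúdo"

-- ===== PORT A =====
-- page['depth'] raises KeyError when absent; Pre_ excludes that, '.getD 0' only totalizes the port.
def analyze_site_strategy (site_structure : List (String × List (List (String × Int)))) : String :=
  match (PySem.Dict.mk site_structure).get? "structure" with
  | none => pvMsgNoStruct
  | some pages =>
    if pages = [] then pvMsgNoStruct
    else
      -- for page in pages: if depth not in depth_analysis: depth_analysis[depth] = []; depth_analysis[depth].append(page)
      let depth_analysis : PySem.Dict Int (List (List (String × Int))) :=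
        pages.foldl
          (fun d page => d.modify (((PySem.Dict.mk page).get? "depth").getD 0) [] (fun l => l ++ [page]))
          PySem.Dict.empty
      let max_depth : Int :=
        match PySem.List.max? depth_analysis.keys (fun x => x) with
        | some m => m
        | none => 0
      let insights : List String :=
        if max_depth ≤ 2 then [pvMsgShallow]
        else if max_depth ≤ 4 then [pvMsgMid]
        else [pvMsgDeep]
      let pages_per_level : List Int :=
        (PySem.List.pyRange 0 (max_depth + 1)).map (fun i => ((depth_analysis.getD i []).length : Int))
      let insights :=
        if 1 < pages_per_level.length ∧
           (PySem.List.pyGet? pages_per_level 1).getD 0 > (PySem.List.pyGet? pages_per_level 0).getD 0 * 3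
        then insights ++ [pvMsgSecond] else insights
      let home_links : Int := ((depth_analysis.getD 0 []).length : Int)
      let insights :=
        if home_links > 10 then insights ++ [pvMsgMany]
        else if home_links < 3 then insights ++ [pvMsgFew]
        else insights
      PySem.Str.join "\n" insights

-- ===== PORT B =====
-- loop body of B: update (running max, count0, count1) with one page's depth d
def pvStepB (s : Option Int × Int × Int) (d : Int) : Option Int × Int × Int :=
  ((match s.1 with | none => some d | some m => if d > m then some d else some m),
   (if d = 0 then s.2.1 + 1 else s.2.1),
   (if d = 0 then s.2.2 else if d = 1 then s.2.2 + 1 else s.2.2))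

def analyze_site_strategy_alt (site_structure : List (String × List (List (String × Int)))) : String :=
  match (PySem.Dict.mk site_structure).get? "structure" with
  | none => pvMsgNoStruct
  | some pages =>
    if pages = [] then pvMsgNoStruct
    else
      let st : Option Int × Int × Int :=
        pages.foldl (fun s page => pvStepB s (((PySem.Dict.mk page).get? "depth").getD 0)) (none, 0, 0)
      let max_depth : Int := st.1.getD 0   -- pages ≠ [], so st.1 is some; getD only totalizes
      let count0 : Int := st.2.1
      let count1 : Int := st.2.2
      let insights : List String :=
        if max_depth ≤ 2 then [pvMsgShallow]
        else if max_depth ≤ 4 then [pvMsgMid]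
        else [pvMsgDeep]
      let insights :=
        if 1 ≤ max_depth ∧ count1 > count0 * 3 then insights ++ [pvMsgSecond] else insights
      let insights :=
        if count0 > 10 then insights ++ [pvMsgMany]
        else if count0 < 3 then insights ++ [pvMsgFew]
        else insights
      PySem.Str.join "\n" insights

-- ===== PRECONDITION & SPEC =====
-- Pre_ excludes exactly the inputs where Python A raises KeyError: a non-empty 'structure' list containing a page without key 'depth'.
def Pre_analyze_site_strategy (site_structure : List (String × List (List (String × Int)))) : Prop :=
  (((PySem.Dict.mk site_structure).get? "structure").getD []).all
    (fun page => (PySem.Dict.mk page).contains "depth") = true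
instance (site_structure : List (String × List (List (String × Int)))) : Decidable (Pre_analyze_site_strategy site_structure) := by unfold Pre_analyze_site_strategy; infer_instance

def pvWitness_analyze_site_strategy : (List (String × List (List (String × Int)))) :=
  [("structure", [[("depth", 0)], [("depth", 0)], [("depth", 1)]])]

def Spec_analyze_site_strategy (site_structure : List (String × List (List (String × Int)))) (out : String) : Prop := out = analyze_site_strategy_alt site_structure
instance (site_structure : List (String × List (List (String × Int)))) (out : String) : Decidable (Spec_analyze_site_strategy site_structure out) := by unfold Spec_analyze_site_strategy; infer_instance

-- ===== CLAIM (what is proved, stated in full; the proofs are below) =====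
def Claim_equal_analyze_site_strategy : Prop := ∀ (site_structure : List (String × List (List (String × Int)))), Dom_analyze_site_strategy site_structure → Pre_analyze_site_strategy site_structure → Spec_analyze_site_strategy site_structure (analyze_site_strategy site_structure)

-- ===== LEMMAS AND PROOFS =====

-- A's grouped dict: the bucket at key c holds exactly the pages whose depth is c
lemma pv_getD_depth {P : Type} (pages : List P) (dp : P → Int) (c : Int) :
    (((pages.foldl (fun d page => d.modify (dp page) [] (fun l => l ++ [page])) PySem.Dict.empty :
        PySem.Dict Int (List P))).getD c []).length = (pages.map dp).count c := by
  have h1 : (pages.foldl (fun d page => d.modify (dp page) [] (fun l => l ++ [page])) PySem.Dict.empty :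
        PySem.Dict Int (List P))
      = (pages.map (fun p => (dp p, p))).foldl (fun d q => d.modify q.1 [] (fun l => l ++ [q.2]))
          PySem.Dict.empty := by
    rw [List.foldl_map]
  rw [h1, PySem.Dict.getD_foldl_modify_append]
  simp only [PySem.Dict.getD_empty, List.nil_append, List.filter_map, List.map_map,
    List.map_id', List.count_eq_countP, List.countP_map, Function.comp_def]
  exact Eq.symm List.countP_eq_length_filter

-- A's dict keys are the distinct depths, so max over them is max over all depths
lemma pv_max?_ofList (ds : List Int) :
    PySem.List.max? (PySem.Set.ofList ds) (fun x => x) = PySem.List.max? ds (fun x => x) := by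
  cases h : PySem.List.max? ds (fun x => x) with
  | none =>
    rw [PySem.List.max?_eq_none_iff] at h
    subst h
    rfl
  | some m =>
    cases h' : PySem.List.max? (PySem.Set.ofList ds) (fun x => x) with
    | none =>
      rw [PySem.List.max?_eq_none_iff] at h'
      have hm := PySem.List.max?_mem h
      have : m ∈ PySem.Set.ofList ds := (PySem.Set.mem_ofList ds m).2 hm
      rw [h'] at this
      cases this
    | some m' =>
      have h1 : m' ≤ m :=
        PySem.List.max?_isMax h m' ((PySem.Set.mem_ofList ds m').1 (PySem.List.max?_mem h'))
      have h2 : m ≤ m' :=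
        PySem.List.max?_isMax h' m ((PySem.Set.mem_ofList ds m).2 (PySem.List.max?_mem h))
      simp only [Option.some.injEq]
      omega

-- B's scan, started after the first element
lemma pv_scanB (ds : List Int) (m c0 c1 : Int) :
    ds.foldl pvStepB (some m, c0, c1)
      = (some (ds.foldl max m), c0 + (ds.count 0 : Int), c1 + (ds.count 1 : Int)) := by
  induction ds generalizing m c0 c1 with
  | nil => simp
  | cons d t ih =>
    simp only [List.foldl_cons, pvStepB]
    have h1 : (if d > m then some d else some m) = some (max m d) := by
      rw [max_def]; split_ifs <;> simp only [Option.some.injEq] <;> omega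
    rw [h1, ih]
    simp only [Prod.mk.injEq, List.count_cons]
    refine ⟨trivial, ?_, ?_⟩ <;> split_ifs <;> simp_all <;> omega

-- B's scan from the start (non-empty list)
lemma pv_scanB0 (d : Int) (t : List Int) :
    (d :: t).foldl pvStepB (none, 0, 0)
      = (some (t.foldl max d), ((d :: t).count 0 : Int), ((d :: t).count 1 : Int)) := by
  simp only [List.foldl_cons, pvStepB, pv_scanB]
  simp only [Prod.mk.injEq, List.count_cons]
  refine ⟨trivial, ?_, ?_⟩ <;> split_ifs <;> simp_all <;> omega

-- A's distribution test over pages_per_level equals B's scalar test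
lemma pv_cond (M : Int) (g : Int → Int) :
    (1 < ((PySem.List.pyRange 0 (M + 1)).map g).length ∧
       (PySem.List.pyGet? ((PySem.List.pyRange 0 (M + 1)).map g) 1).getD 0 >
         (PySem.List.pyGet? ((PySem.List.pyRange 0 (M + 1)).map g) 0).getD 0 * 3)
    ↔ (1 ≤ M ∧ g 1 > g 0 * 3) := by
  by_cases h : 1 ≤ M
  · rw [PySem.List.pyRange_one_cons (by omega), PySem.List.pyRange_one_cons (by omega)]
    rw [show ((0:Int) + 1) = 1 by norm_num]
    simp only [List.map_cons, List.length_cons]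
    have e1 : ∀ L : List Int, (PySem.List.pyGet? (g 0 :: g 1 :: L) 1).getD 0 = g 1 := by
      intro L
      simp [PySem.List.pyGet?, PySem.List.pyIdx?]
    have e0 : ∀ L : List Int, (PySem.List.pyGet? (g 0 :: g 1 :: L) 0).getD 0 = g 0 := by
      intro L
      simp [PySem.List.pyGet?, PySem.List.pyIdx?, show ((0:Int) ≤ ↑L.length + 1) by omega]
    rw [e1, e0]
    constructor
    · rintro ⟨-, h2⟩; exact ⟨h, h2⟩
    · rintro ⟨-, h2⟩; exact ⟨by omega, h2⟩
  · by_cases h0 : (0 : Int) < M + 1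
    · rw [PySem.List.pyRange_one_cons h0, PySem.List.pyRange_one_eq_nil (by omega)]
      constructor
      · rintro ⟨h1, -⟩; simp at h1
      · rintro ⟨h1, -⟩; omega
    · rw [PySem.List.pyRange_one_eq_nil (by omega)]
      constructor
      · rintro ⟨h1, -⟩; simp at h1
      · rintro ⟨h1, -⟩; omega

-- ===== VERDICT (by name: the statement is the Claim_ definition above) =====
theorem analyze_site_strategy_spec : Claim_equal_analyze_site_strategy := by
  intro ss _hdom _hpre
  unfold Spec_analyze_site_strategy
  unfold analyze_site_strategy analyze_site_strategy_alt
  cases hs : (PySem.Dict.mk ss).get? "structure" with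
  | none => rfl
  | some pages =>
    cases pages with
    | nil => simp
    | cons p rest =>
      simp only [List.cons_ne_nil, if_false]
      have hkeys :
          ((p :: rest).foldl
            (fun d page => d.modify (((PySem.Dict.mk page).get? "depth").getD 0) []
              (fun l => l ++ [page])) PySem.Dict.empty).keys
          = PySem.Set.ofList ((p :: rest).map
              (fun page => ((PySem.Dict.mk page).get? "depth").getD 0)) := by
        rw [PySem.Dict.keys_foldl_modify_key
          (key := fun page => ((PySem.Dict.mk page).get? "depth").getD 0)]
        rw [← PySem.Set.update_nil_left]
        rfl
      rw [hkeys, pv_max?_ofList, List.map_cons, PySem.List.max?_id_cons]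
      rw [← List.foldl_map
        (f := fun (page : List (String × Int)) => ((PySem.Dict.mk page).get? "depth").getD 0)
        (g := pvStepB) (l := p :: rest) (init := ((none, 0, 0) : Option Int × Int × Int))]
      rw [List.map_cons, pv_scanB0]
      simp only [pv_getD_depth, List.map_cons, Option.getD_some]
      simp only [pv_cond]
      rfl
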